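-- pv_equiv track=rewrite | github.com/tombch/pyqubits | pyqubits/utils.py | _cgate
-- ===== SOURCE A (Python) =====
-- class PyQubitsError(Exception):
--     pass
--
-- def _cgate(control, target, gate_char):
--     """
--     Helper function for gate classes.
--     Creates a cgate representation that will be added to a state's circuit.
--     """
--     gate = []
--     if control < target:
--         gate.append(["O"])
--         gate.append(["|"])
--         for _ in range(abs(target - control) - 1):
--             gate.append(["|"])
--             gate.append(["|"])
--         gate.append([gate_char])
--     elif control > target:
--         gate.append([gate_char])
--         gate.append(["|"])
--         for _ in range(abs(target - control) - 1):
--             gate.append(["|"])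
--             gate.append(["|"])
--         gate.append(["O"])
--     else:
--         raise PyQubitsError("'control' and 'target' cannot be the same")
--     return gate
-- ===== SOURCE B (Python) =====
-- class PyQubitsError(Exception):
--     pass
--
-- def _cgate(control, target, gate_char):
--     if control == target:
--         raise PyQubitsError("'control' and 'target' cannot be the same")
--     d = abs(target - control)
--     endpoints = {0: "O" if control < target else gate_char,
--                  2 * d: gate_char if control < target else "O"}
--     return [[endpoints.get(i, "|")] for i in range(2 * d + 1)]
-- ===== Notes on version B (the rewrite author's own statement) =====
-- stated objective: alternative
-- what changed: Replaces A's two mirrored sequential append-loops (pushing two bar cells per iteration) by a position-indexed construction: the column length 2*|target-control|+1 is computed up front and each row is determined by its index via an endpoint dictionary lookup with '|' as the default.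
import Mathlib
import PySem

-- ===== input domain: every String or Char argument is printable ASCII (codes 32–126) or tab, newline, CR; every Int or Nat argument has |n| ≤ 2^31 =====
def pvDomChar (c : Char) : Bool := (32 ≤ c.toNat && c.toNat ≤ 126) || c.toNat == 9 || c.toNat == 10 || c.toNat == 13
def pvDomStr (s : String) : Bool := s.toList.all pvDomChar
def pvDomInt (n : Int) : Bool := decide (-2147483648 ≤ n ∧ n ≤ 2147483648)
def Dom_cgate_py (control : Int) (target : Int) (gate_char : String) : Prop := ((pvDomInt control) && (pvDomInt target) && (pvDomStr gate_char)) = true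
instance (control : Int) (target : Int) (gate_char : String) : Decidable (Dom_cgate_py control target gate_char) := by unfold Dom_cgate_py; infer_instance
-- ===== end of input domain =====

-- B replaces A's two mirrored append-loops by a position-indexed map: row i is looked up in an endpoint dict with '|' as default; objective: alternative.
-- ===== PORT A =====
def cgate_py (control : Int) (target : Int) (gate_char : String) : List (List String) :=
  if control < target then
    let gate : List (List String) := []
    let gate := gate ++ [["O"]]
    let gate := gate ++ [["|"]]
    let gate := (PySem.List.pyRange 0 ((target - control).natAbs - 1 : Int) 1).foldl
      (fun acc _ => (acc ++ [["|"]]) ++ [["|"]]) gate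
    gate ++ [[gate_char]]
  else if control > target then
    let gate : List (List String) := []
    let gate := gate ++ [[gate_char]]
    let gate := gate ++ [["|"]]
    let gate := (PySem.List.pyRange 0 ((target - control).natAbs - 1 : Int) 1).foldl
      (fun acc _ => (acc ++ [["|"]]) ++ [["|"]]) gate
    gate ++ [["O"]]
  else
    []  -- Python raises PyQubitsError here; excluded by Pre_cgate_py

-- ===== PORT B =====
def cgate_py_alt (control : Int) (target : Int) (gate_char : String) : List (List String) :=
  if control = target then []  -- Python raises PyQubitsError here; excluded by Pre_cgate_py
  else
    let d : Int := (target - control).natAbs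
    let endpoints : PySem.Dict Int String :=
      ((PySem.Dict.empty).insert 0 (if control < target then "O" else gate_char)).insert
        (2 * d) (if control < target then gate_char else "O")
    (PySem.List.pyRange 0 (2 * d + 1) 1).map (fun i => [endpoints.getD i "|"])

-- ===== PRECONDITION & SPEC =====
-- Pre_ excludes control = target, where A raises PyQubitsError.
def Pre_cgate_py (control : Int) (target : Int) (gate_char : String) : Prop := control ≠ target
instance (control : Int) (target : Int) (gate_char : String) : Decidable (Pre_cgate_py control target gate_char) := by unfold Pre_cgate_py; infer_instance
def pvWitness_cgate_py : Int × Int × String := (0, 2, "X")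
def Spec_cgate_py (control : Int) (target : Int) (gate_char : String) (out : List (List String)) : Prop := out = cgate_py_alt control target gate_char
instance (control : Int) (target : Int) (gate_char : String) (out : List (List String)) : Decidable (Spec_cgate_py control target gate_char out) := by unfold Spec_cgate_py; infer_instance

-- ===== CLAIM (what is proved, stated in full; the proofs are below) =====
def Claim_equal_cgate_py : Prop := ∀ (control : Int) (target : Int) (gate_char : String), Dom_cgate_py control target gate_char → Pre_cgate_py control target gate_char → Spec_cgate_py control target gate_char (cgate_py control target gate_char)

-- ===== LEMMAS AND PROOFS =====
theorem foldl_two_bars {α : Type} (l : List α) (init : List (List String)) :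
    l.foldl (fun acc (_ : α) => (acc ++ [["|"]]) ++ [["|"]]) init
      = init ++ List.replicate (2 * l.length) ["|"] := by
  induction l generalizing init with
  | nil => simp
  | cons x xs ih =>
      rw [List.foldl_cons, ih]
      simp only [List.length_cons]
      rw [show 2 * (xs.length + 1) = 2 * xs.length + 1 + 1 from by ring]
      simp [List.replicate_succ, List.append_assoc]

theorem map_range_head (n : Nat) (hn : 1 ≤ n) (top : String) :
    (List.range n).map (fun (k : Nat) => if (k : Int) = 0 then [top] else (["|"] : List String))
      = [top] :: List.replicate (n - 1) ["|"] := by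
  obtain ⟨m, rfl⟩ : ∃ m, n = m + 1 := ⟨n - 1, by omega⟩
  rw [List.range_succ_eq_map, List.map_cons, List.map_map]
  simp [Function.comp_def]

theorem map_range_column (n : Nat) (hn : 1 ≤ n) (top bot : String) :
    (List.range (n + 1)).map
        (fun (k : Nat) => if (k : Int) = (n : Int) then [bot]
                  else if (k : Int) = 0 then [top] else (["|"] : List String))
      = [top] :: List.replicate (n - 1) ["|"] ++ [[bot]] := by
  rw [List.range_succ, List.map_append]
  have hfront : (List.range n).map
      (fun (k : Nat) => if (k : Int) = (n : Int) then [bot]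
                else if (k : Int) = 0 then [top] else (["|"] : List String))
      = (List.range n).map (fun (k : Nat) => if (k : Int) = 0 then [top] else (["|"] : List String)) := by
    apply List.map_congr_left
    intro k hk
    rw [List.mem_range] at hk
    rw [if_neg (by exact_mod_cast Nat.ne_of_lt hk)]
  rw [hfront, map_range_head n hn top]
  simp

-- ===== VERDICT (by name: the statement is the Claim_ definition above) =====
theorem cgate_py_spec : Claim_equal_cgate_py := by
  intro control target gate_char _ hpre
  unfold Spec_cgate_py cgate_py cgate_py_alt
  rcases lt_trichotomy control target with h | h | h
  · have hn : 1 ≤ (target - control).natAbs := by omega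
    set d : Nat := (target - control).natAbs with hd
    have hne : ¬ control = target := by omega
    dsimp only
    simp only [if_pos h, if_neg hne]
    -- B side: position-indexed map → closed form
    simp only [PySem.List.pyRange_one]
    have hcast : ((2 * (d : Int) + 1 - 0)).toNat = 2 * d + 1 := by omega
    rw [hcast, List.map_map]
    have hfun : ((fun i => [PySem.Dict.getD
          ((PySem.Dict.empty.insert 0 "O").insert (2 * (d : Int)) gate_char) i "|"])
            ∘ (fun k : Nat => (0 : Int) + k))
        = fun k : Nat => if (k : Int) = ((2 * d : Nat) : Int) then [gate_char]
                         else if (k : Int) = 0 then ["O"] else (["|"] : List String) := by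
      funext k
      simp only [Function.comp_apply, zero_add, PySem.Dict.getD_insert, PySem.Dict.getD_empty]
      push_cast
      by_cases h1 : (k : Int) = 2 * (d : Int)
      · simp [h1]
      · rw [if_neg h1, if_neg h1]
        by_cases h2 : k = 0 <;> simp [h2]
    rw [hfun, map_range_column (2 * d) (by omega) "O" gate_char]
    -- A side: foldl → closed form
    simp only [foldl_two_bars, PySem.List.length_pyRange_one]
    rw [show (((d : Int) - 1 - 0)).toNat = d - 1 from by omega]
    rw [show 2 * d - 1 = 2 * (d - 1) + 1 from by omega]
    simp [List.replicate_succ]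
  · exact absurd h hpre
  · have hn : 1 ≤ (target - control).natAbs := by omega
    set d : Nat := (target - control).natAbs with hd
    have hne : ¬ control = target := by omega
    have hnlt : ¬ control < target := by omega
    dsimp only
    simp only [if_neg hnlt, if_pos h, if_neg hne]
    simp only [PySem.List.pyRange_one]
    have hcast : ((2 * (d : Int) + 1 - 0)).toNat = 2 * d + 1 := by omega
    rw [hcast, List.map_map]
    have hfun : ((fun i => [PySem.Dict.getD
          ((PySem.Dict.empty.insert 0 gate_char).insert (2 * (d : Int)) "O") i "|"])
            ∘ (fun k : Nat => (0 : Int) + k))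
        = fun k : Nat => if (k : Int) = ((2 * d : Nat) : Int) then ["O"]
                         else if (k : Int) = 0 then [gate_char] else (["|"] : List String) := by
      funext k
      simp only [Function.comp_apply, zero_add, PySem.Dict.getD_insert, PySem.Dict.getD_empty]
      push_cast
      by_cases h1 : (k : Int) = 2 * (d : Int)
      · simp [h1]
      · rw [if_neg h1, if_neg h1]
        by_cases h2 : k = 0 <;> simp [h2]
    rw [hfun, map_range_column (2 * d) (by omega) gate_char "O"]
    simp only [foldl_two_bars, PySem.List.length_pyRange_one]
    rw [show (((d : Int) - 1 - 0)).toNat = d - 1 from by omega]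
    rw [show 2 * d - 1 = 2 * (d - 1) + 1 from by omega]
    simp [List.replicate_succ]
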